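-- pv_equiv track=rewrite | github.com/nujar00t/kairuai | agents/utils.py | truncate_texts
-- ===== SOURCE A (Python) =====
-- def truncate_texts(texts: list[str], max_chars: int = 4000) -> list[str]:
--     """Truncate a list of texts to stay within a character budget."""
--     result: list[str] = []
--     total = 0
--     for text in texts:
--         if total + len(text) > max_chars:
--             break
--         result.append(text)
--         total += len(text)
--     return result
-- ===== SOURCE B (Python) =====
-- from bisect import bisect_right
-- from itertools import accumulate
--
-- def truncate_texts(texts: list[str], max_chars: int = 4000) -> list[str]:
--     """Truncate a list of texts to stay within a character budget."""
--     cums = list(accumulate(len(t) for t in texts))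
--     return texts[:bisect_right(cums, max_chars)]
-- ===== Notes on version B (the rewrite author's own statement) =====
-- stated objective: alternative
-- what changed: Replaces the running-total loop with break by building the prefix-sum table (itertools.accumulate) and locating the cut index with a binary search (bisect.bisect_right), then returning one slice; correct because prefix sums of nonnegative lengths are nondecreasing.
import Mathlib
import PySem

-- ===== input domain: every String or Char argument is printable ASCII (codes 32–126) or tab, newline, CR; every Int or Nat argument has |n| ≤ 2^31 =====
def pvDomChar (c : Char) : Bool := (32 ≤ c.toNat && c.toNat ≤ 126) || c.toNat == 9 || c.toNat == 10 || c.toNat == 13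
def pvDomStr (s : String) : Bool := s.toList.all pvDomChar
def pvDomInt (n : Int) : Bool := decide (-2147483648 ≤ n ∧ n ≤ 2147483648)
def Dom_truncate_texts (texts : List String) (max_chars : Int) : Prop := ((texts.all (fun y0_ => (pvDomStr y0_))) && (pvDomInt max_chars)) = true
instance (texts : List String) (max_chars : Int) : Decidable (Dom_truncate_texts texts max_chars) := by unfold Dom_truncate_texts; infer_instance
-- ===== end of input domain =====

-- B replaces A's running-total loop with break by a prefix-sum table cut with a
-- binary search (bisect_right) and one slice (alternative decomposition, same cost).

-- ===== PORT A =====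
-- A's for-loop with `total` accumulator and break, as structural recursion.
def truncate_texts_go (max_chars : Int) : List String → Int → List String
  | [], _ => []
  | t :: ts, total =>
    if total + PySem.Str.len t > max_chars then []
    else t :: truncate_texts_go max_chars ts (total + PySem.Str.len t)

def truncate_texts (texts : List String) (max_chars : Int) : List String :=
  truncate_texts_go max_chars texts 0

-- ===== PORT B =====
-- itertools.accumulate: running sums (no initial element).
def pyAccumulate (acc : Int) : List Int → List Int
  | [] => []
  | x :: xs => (acc + x) :: pyAccumulate (acc + x) xs

-- bisect.bisect_right(a, x): the CPython loop, step for step.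
def bisectRightGo (a : List Int) (x : Int) (lo hi : Nat) : Nat :=
  if _h : lo < hi then
    let mid := (lo + hi) / 2
    if x < a.getD mid 0 then bisectRightGo a x lo mid
    else bisectRightGo a x (mid + 1) hi
  else lo
termination_by hi - lo
decreasing_by all_goals omega

def bisectRight (a : List Int) (x : Int) : Nat := bisectRightGo a x 0 a.length

def truncate_texts_alt (texts : List String) (max_chars : Int) : List String :=
  let cums := pyAccumulate 0 (texts.map PySem.Str.len)
  -- texts[:k] with k = bisect_right result, a Nat in [0, len]: exactly List.take
  texts.take (bisectRight cums max_chars)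

-- ===== PRECONDITION & SPEC =====
def Spec_truncate_texts (texts : List String) (max_chars : Int) (out : List String) : Prop := out = truncate_texts_alt texts max_chars
instance (texts : List String) (max_chars : Int) (out : List String) : Decidable (Spec_truncate_texts texts max_chars out) := by unfold Spec_truncate_texts; infer_instance

-- ===== CLAIM (what is proved, stated in full; the proofs are below) =====
def Claim_equal_truncate_texts : Prop := ∀ (texts : List String) (max_chars : Int), Dom_truncate_texts texts max_chars → Spec_truncate_texts texts max_chars (truncate_texts texts max_chars)

-- ===== LEMMAS AND PROOFS =====

theorem pyAccumulate_length (acc : Int) (l : List Int) :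
    (pyAccumulate acc l).length = l.length := by
  induction l generalizing acc with
  | nil => rfl
  | cons x xs ih => simp [pyAccumulate, ih]

theorem pyAccumulate_getD (l : List Int) (acc : Int) (i : Nat) (hi : i < l.length) :
    (pyAccumulate acc l).getD i 0 = acc + (l.take (i + 1)).sum := by
  induction l generalizing acc i with
  | nil => simp at hi
  | cons x xs ih =>
    cases i with
    | zero => simp [pyAccumulate]
    | succ n =>
      simp only [pyAccumulate, List.getD_cons_succ, List.take_succ_cons, List.sum_cons]
      rw [ih (acc + x) n (by simpa using hi)]
      ring

theorem pyAccumulate_mono (l : List Int) (hnn : ∀ v ∈ l, 0 ≤ v) (acc : Int)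
    (i j : Nat) (hij : i ≤ j) (hj : j < l.length) :
    (pyAccumulate acc l).getD i 0 ≤ (pyAccumulate acc l).getD j 0 := by
  rw [pyAccumulate_getD l acc i (lt_of_le_of_lt hij hj), pyAccumulate_getD l acc j hj]
  have hsplit : l.take (j + 1) = l.take (i + 1) ++ (l.drop (i + 1)).take (j - i) := by
    rw [← List.take_add]
    congr 1
    omega
  have hrest : 0 ≤ ((l.drop (i + 1)).take (j - i)).sum := by
    apply List.sum_nonneg
    intro v hv
    exact hnn v (List.mem_of_mem_drop (List.mem_of_mem_take hv))
  rw [hsplit, List.sum_append]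
  omega

-- takeWhile length as the cut point: everything before is ≤ x, the element at it (if any) is > x.
theorem takeWhile_len_spec (x : Int) (a : List Int) :
    (∀ i, i < (a.takeWhile (fun v => decide (v ≤ x))).length → a.getD i 0 ≤ x) ∧
    ((a.takeWhile (fun v => decide (v ≤ x))).length < a.length →
      x < a.getD (a.takeWhile (fun v => decide (v ≤ x))).length 0) := by
  induction a with
  | nil => simp
  | cons h t ih =>
    by_cases hx : h ≤ x
    · simp only [List.takeWhile_cons, decide_eq_true hx, if_true, List.length_cons]
      constructor
      · intro i hi
        cases i with
        | zero => simpa using hx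
        | succ n => exact ih.1 n (by omega)
      · intro hlt
        simpa using ih.2 (by simpa using hlt)
    · simp only [List.takeWhile_cons, decide_eq_false hx]
      refine ⟨?_, ?_⟩
      · intro i hi
        simp at hi
      · intro _
        simpa using lt_of_not_ge hx

theorem bisectRightGo_eq (a : List Int) (x : Int) (k : Nat)
    (hk : k ≤ a.length)
    (P1 : ∀ i, i < k → a.getD i 0 ≤ x)
    (P2 : k < a.length → x < a.getD k 0)
    (mono : ∀ i j, i ≤ j → j < a.length → a.getD i 0 ≤ a.getD j 0) :
    ∀ n lo hi, hi - lo ≤ n → lo ≤ k → k ≤ hi → hi ≤ a.length →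
      bisectRightGo a x lo hi = k := by
  intro n
  induction n with
  | zero =>
    intro lo hi h1 h2 h3 _
    rw [bisectRightGo]
    rw [dif_neg (by omega)]
    omega
  | succ m ih =>
    intro lo hi h1 h2 h3 h4
    rw [bisectRightGo]
    by_cases hlh : lo < hi
    · rw [dif_pos hlh]
      set mid := (lo + hi) / 2 with hmid
      have hm1 : lo ≤ mid := by omega
      have hm2 : mid < hi := by omega
      by_cases hc : x < a.getD mid 0
      · rw [if_pos hc]
        have hkm : k ≤ mid := by
          by_contra hlt
          exact absurd (P1 mid (by omega)) (not_le.mpr hc)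
        exact ih lo mid (by omega) h2 hkm (by omega)
      · rw [if_neg hc]
        have hmk : mid < k := by
          by_contra hge
          have hkm : k ≤ mid := by omega
          have hklen : k < a.length := by omega
          exact hc (lt_of_lt_of_le (P2 hklen) (mono k mid hkm (by omega)))
        exact ih (mid + 1) hi (by omega) (by omega) h3 h4
    · rw [dif_neg hlh]; omega

-- A's loop equals the takeWhile cut of the prefix sums zipped with the texts.
theorem truncate_texts_go_eq (max_chars : Int) (texts : List String) (total : Int) :
    truncate_texts_go max_chars texts total =
      (((pyAccumulate total (texts.map PySem.Str.len)).zip texts).takeWhile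
          (fun p => decide (p.1 ≤ max_chars))).map (·.2) := by
  induction texts generalizing total with
  | nil => simp [truncate_texts_go, pyAccumulate]
  | cons t ts ih =>
    simp only [truncate_texts_go, List.map_cons, pyAccumulate, List.zip_cons_cons,
      List.takeWhile_cons]
    by_cases h : total + PySem.Str.len t ≤ max_chars
    · rw [if_neg (not_lt.mpr h), if_pos (decide_eq_true h), ih, List.map_cons]
    · rw [if_pos (by omega), if_neg (by simpa using h), List.map_nil]

-- the zipped takeWhile projects to take of the takeWhile length on the first components.
theorem zip_takeWhile_map (x : Int) : ∀ (a : List Int) (ts : List String),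
    a.length = ts.length →
    ((a.zip ts).takeWhile (fun p => decide (p.1 ≤ x))).map (·.2) =
      ts.take (a.takeWhile (fun v => decide (v ≤ x))).length := by
  intro a
  induction a with
  | nil => intro ts h; simp
  | cons c cs ih =>
    intro ts h
    cases ts with
    | nil => simp at h
    | cons t tts =>
      simp only [List.zip_cons_cons, List.takeWhile_cons]
      by_cases hc : c ≤ x
      · simp only [decide_eq_true hc, if_true, List.map_cons, List.length_cons,
          List.take_succ_cons]
        rw [ih tts (by simpa using h)]
      · simp [decide_eq_false hc]

theorem str_len_nonneg (s : String) : 0 ≤ PySem.Str.len s := by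
  simp [PySem.Str.len_eq]

-- ===== VERDICT (by name: the statement is the Claim_ definition above) =====
theorem truncate_texts_spec : Claim_equal_truncate_texts := by
  intro texts max_chars _
  unfold Spec_truncate_texts truncate_texts truncate_texts_alt
  set a := pyAccumulate 0 (texts.map PySem.Str.len) with ha
  have hlen : a.length = texts.length := by
    rw [ha, pyAccumulate_length, List.length_map]
  set k := (a.takeWhile (fun v => decide (v ≤ max_chars))).length with hkdef
  have hkle : k ≤ a.length := by
    rw [hkdef]; exact (List.takeWhile_sublist _).length_le
  have hspec := takeWhile_len_spec max_chars a
  have hmono : ∀ i j, i ≤ j → j < a.length → a.getD i 0 ≤ a.getD j 0 := by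
    intro i j hij hj
    rw [hlen] at hj
    apply pyAccumulate_mono
    · intro v hv
      obtain ⟨s, _, rfl⟩ := List.mem_map.mp hv
      exact str_len_nonneg s
    · exact hij
    · simpa using hj
  have hbis : bisectRight a max_chars = k := by
    unfold bisectRight
    exact bisectRightGo_eq a max_chars k hkle hspec.1 hspec.2 hmono a.length 0 a.length
      (by omega) (by omega) hkle (le_refl _)
  show truncate_texts_go max_chars texts 0 = texts.take (bisectRight a max_chars)
  rw [truncate_texts_go_eq, ← ha, zip_takeWhile_map max_chars a texts hlen, hbis]
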